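-- pv_equiv track=rewrite | github.com/BBuf/how-to-optim-algorithm-in-cuda | meagtron-lm/playground.py | generate_pipeline_parallel_groups
-- ===== SOURCE A (Python) =====
-- def generate_pipeline_parallel_groups(world_size, pipeline_model_parallel_size):
--     """
--     Generate pipeline parallel groups based on pipeline model parallel size.
--     """
--     assert world_size % pipeline_model_parallel_size == 0, "world_size must be divisible by pipeline_model_parallel_size"
--     num_pipeline_model_parallel_groups = world_size // pipeline_model_parallel_size
--     pipline_parallel_group_ranks = []
--
--     for i in range(num_pipeline_model_parallel_groups):
--         ranks = range(i, world_size, num_pipeline_model_parallel_groups)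
--         pipline_parallel_group_ranks.append(list(ranks))
--     return pipline_parallel_group_ranks
-- ===== SOURCE B (Python) =====
-- def generate_pipeline_parallel_groups(world_size, pipeline_model_parallel_size):
--     """
--     Generate pipeline parallel groups based on pipeline model parallel size.
--     """
--     assert world_size % pipeline_model_parallel_size == 0, "world_size must be divisible by pipeline_model_parallel_size"
--     num_pipeline_model_parallel_groups = world_size // pipeline_model_parallel_size
--     groups = [[] for _ in range(num_pipeline_model_parallel_groups)]
--     for rank in range(world_size):
--         groups[rank % num_pipeline_model_parallel_groups].append(rank)
--     return groups
-- ===== Notes on version B (the rewrite author's own statement) =====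
-- stated objective: alternative
-- what changed: Replaces A's nested construction (one strided range(i, world_size, num_groups) per group) with a single flat pass over all ranks that scatters each rank into bucket rank % num_groups.
-- outside the precondition, e.g. on generate_pipeline_parallel_groups(4, -2): A returns [], B raises IndexError
import Mathlib
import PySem

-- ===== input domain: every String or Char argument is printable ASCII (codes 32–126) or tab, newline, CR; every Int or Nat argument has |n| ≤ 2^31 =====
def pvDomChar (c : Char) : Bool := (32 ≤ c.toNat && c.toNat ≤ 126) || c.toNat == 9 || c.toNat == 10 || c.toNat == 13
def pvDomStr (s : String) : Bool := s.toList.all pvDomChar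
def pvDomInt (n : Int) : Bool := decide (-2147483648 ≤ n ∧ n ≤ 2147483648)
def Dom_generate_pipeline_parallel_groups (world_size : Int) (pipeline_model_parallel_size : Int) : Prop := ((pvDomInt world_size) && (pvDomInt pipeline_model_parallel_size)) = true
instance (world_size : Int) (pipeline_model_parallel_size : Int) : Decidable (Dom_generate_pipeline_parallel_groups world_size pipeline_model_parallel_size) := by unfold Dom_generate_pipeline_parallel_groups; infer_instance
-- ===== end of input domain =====

-- B replaces A's nested per-group strided-range construction by one flat scatter pass that
-- buckets every rank by its residue modulo the group count (objective: alternative decomposition).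

-- ===== PORT A =====
def generate_pipeline_parallel_groups (world_size : Int) (pipeline_model_parallel_size : Int) : List (List Int) :=
  let num := PySem.Int.floordiv world_size pipeline_model_parallel_size
  (PySem.List.pyRange 0 num 1).foldl
    (fun acc i => acc ++ [PySem.List.pyRange i world_size num]) []

-- ===== PORT B =====
def generate_pipeline_parallel_groups_alt (world_size : Int) (pipeline_model_parallel_size : Int) : List (List Int) :=
  let num := PySem.Int.floordiv world_size pipeline_model_parallel_size
  let groups := (PySem.List.pyRange 0 num 1).map (fun _ => ([] : List Int))
  (PySem.List.pyRange 0 world_size 1).foldl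
    (fun gs rank =>
      PySem.List.pySetD gs (PySem.Int.mod rank num)
        (PySem.List.pyGetD gs (PySem.Int.mod rank num) [] ++ [rank])) groups

-- ===== PRECONDITION & SPEC =====
-- Pre_ requires the divisor to be nonzero and world_size % divisor == 0 (A's assert raises
-- AssertionError / ZeroDivisionError otherwise), and additionally excludes world_size > 0 with a
-- negative divisor: there the group count is negative, A's empty `range` loop accidentally
-- returns [] while B's natural scatter pass raises IndexError on its empty bucket list.
def Pre_generate_pipeline_parallel_groups (world_size : Int) (pipeline_model_parallel_size : Int) : Prop :=
  PySem.Int.mod world_size pipeline_model_parallel_size = 0 ∧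
  pipeline_model_parallel_size ≠ 0 ∧
  (0 < world_size → 0 < pipeline_model_parallel_size)
instance (world_size : Int) (pipeline_model_parallel_size : Int) : Decidable (Pre_generate_pipeline_parallel_groups world_size pipeline_model_parallel_size) := by unfold Pre_generate_pipeline_parallel_groups; infer_instance

def pvWitness_generate_pipeline_parallel_groups : Int × Int := (8, 2)

def Spec_generate_pipeline_parallel_groups (world_size : Int) (pipeline_model_parallel_size : Int) (out : List (List Int)) : Prop := out = generate_pipeline_parallel_groups_alt world_size pipeline_model_parallel_size
instance (world_size : Int) (pipeline_model_parallel_size : Int) (out : List (List Int)) : Decidable (Spec_generate_pipeline_parallel_groups world_size pipeline_model_parallel_size out) := by unfold Spec_generate_pipeline_parallel_groups; infer_instance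

-- ===== CLAIM (what is proved, stated in full; the proofs are below) =====
def Claim_equal_generate_pipeline_parallel_groups : Prop := ∀ (world_size : Int) (pipeline_model_parallel_size : Int), Dom_generate_pipeline_parallel_groups world_size pipeline_model_parallel_size → Pre_generate_pipeline_parallel_groups world_size pipeline_model_parallel_size → Spec_generate_pipeline_parallel_groups world_size pipeline_model_parallel_size (generate_pipeline_parallel_groups world_size pipeline_model_parallel_size)

-- ===== LEMMAS AND PROOFS =====

-- Two strictly increasing integer lists with the same members are equal.
theorem eq_of_pairwise_lt_mem_iff : ∀ (l1 l2 : List Int), l1.Pairwise (·<·) → l2.Pairwise (·<·) →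
    (∀ x, x ∈ l1 ↔ x ∈ l2) → l1 = l2 := by
  intro l1
  induction l1 with
  | nil =>
    intro l2 _ _ h
    cases l2 with
    | nil => rfl
    | cons b t => exact absurd ((h b).2 (by simp)) (by simp)
  | cons a t ih =>
    intro l2 h1 h2 h
    cases l2 with
    | nil => exact absurd ((h a).1 (by simp)) (by simp)
    | cons b t2 =>
      have h1' := List.pairwise_cons.1 h1
      have h2' := List.pairwise_cons.1 h2
      have hab : a = b := by
        rcases List.mem_cons.1 ((h a).1 (by simp)) with h' | h'
        · exact h'
        · rcases List.mem_cons.1 ((h b).2 (by simp)) with h'' | h''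
          · exact h''.symm
          · exact absurd (lt_trans (h2'.1 a h') (h1'.1 b h'')) (lt_irrefl b)
      subst hab
      have ht : t = t2 := by
        apply ih _ h1'.2 h2'.2
        intro x
        constructor
        · intro hx
          rcases List.mem_cons.1 ((h x).1 (List.mem_cons_of_mem _ hx)) with rfl | h'
          · exact absurd (h1'.1 x hx) (lt_irrefl x)
          · exact h'
        · intro hx
          rcases List.mem_cons.1 ((h x).2 (List.mem_cons_of_mem _ hx)) with rfl | h'
          · exact absurd (h2'.1 x hx) (lt_irrefl x)
          · exact h'
      rw [ht]

theorem pyRange_pos_pairwise (a b s : Int) (hs : 0 < s) : (PySem.List.pyRange a b s).Pairwise (·<·) := by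
  rw [PySem.List.pyRange_of_pos a b hs]
  rw [List.pairwise_map]
  exact List.pairwise_lt_range.imp (fun {k1 k2} hk => by nlinarith)

theorem pyRange_pos_empty (a b s : Int) (hs : 0 < s) (h : b ≤ a) : PySem.List.pyRange a b s = [] := by
  rw [PySem.List.pyRange_of_pos a b hs]
  simp [show ¬ (a < b) by omega]

-- Extending a positive-step range's stop by one appends the new endpoint exactly when it is on the grid.
theorem pyRange_succ_right_step (a m s : Int) (hs : 0 < s) :
    PySem.List.pyRange a (m+1) s = PySem.List.pyRange a m s ++ (if s ∣ m - a ∧ a ≤ m then [m] else []) := by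
  apply eq_of_pairwise_lt_mem_iff _ _ (pyRange_pos_pairwise _ _ _ hs)
  · rcases Classical.em (s ∣ m - a ∧ a ≤ m) with hc | hc
    · simp only [hc]
      rw [List.pairwise_append]
      refine ⟨pyRange_pos_pairwise _ _ _ hs, by simp, ?_⟩
      intro x hx y hy
      simp at hy; subst hy
      exact ((PySem.List.mem_pyRange_iff_of_pos hs x).1 hx).2.1
    · rw [if_neg hc, List.append_nil]
      exact pyRange_pos_pairwise _ _ _ hs
  · intro x
    rw [PySem.List.mem_pyRange_iff_of_pos hs, List.mem_append,
        PySem.List.mem_pyRange_iff_of_pos hs]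
    constructor
    · rintro ⟨hax, hxm, k, hk⟩
      by_cases hxm' : x = m
      · subst hxm'
        right
        rw [if_pos ⟨⟨k, hk⟩, hax⟩]
        simp
      · left; exact ⟨hax, by omega, k, hk⟩
    · rintro (⟨hax, hxm, hd⟩ | hx)
      · exact ⟨hax, by omega, hd⟩
      · rcases Classical.em (s ∣ m - a ∧ a ≤ m) with hc | hc
        · simp [hc] at hx; subst hx
          exact ⟨hc.2, by omega, hc.1⟩
        · simp [hc] at hx

-- B's scatter loop over ranks 0..n-1 fills bucket i with exactly A's strided range(i, n, num).
theorem scatter_eq (num : Int) (hnum : 0 < num) (n : Nat) :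
    (PySem.List.pyRange 0 (n:Int) 1).foldl
      (fun gs rank => PySem.List.pySetD gs (PySem.Int.mod rank num)
          (PySem.List.pyGetD gs (PySem.Int.mod rank num) [] ++ [rank]))
      ((PySem.List.pyRange 0 num 1).map (fun _ => ([] : List Int)))
    = (PySem.List.pyRange 0 num 1).map (fun i => PySem.List.pyRange i (n:Int) num) := by
  induction n with
  | zero =>
    rw [show ((0:Nat):Int) = 0 from rfl, PySem.List.pyRange_one_eq_nil (le_refl 0), List.foldl_nil]
    apply Eq.symm
    apply List.map_congr_left
    intro i hi
    exact pyRange_pos_empty _ _ _ hnum (PySem.List.mem_pyRange_one.1 hi).1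
  | succ n ih =>
    rw [show ((n+1:Nat):Int) = (n:Int) + 1 by push_cast; ring,
        PySem.List.pyRange_one_succ_right (by positivity), List.foldl_concat, ih]
    have hj0 : 0 ≤ PySem.Int.mod (n:Int) num := PySem.Int.mod_nonneg _ hnum
    have hjlt : PySem.Int.mod (n:Int) num < num := PySem.Int.mod_lt _ hnum
    have hjdvd : num ∣ (n:Int) - PySem.Int.mod (n:Int) num := by
      refine ⟨PySem.Int.floordiv (n:Int) num, ?_⟩
      have := PySem.Int.floordiv_mul_add_mod (n:Int) num
      linarith [mul_comm (PySem.Int.floordiv (n:Int) num) num]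
    have hjle : PySem.Int.mod (n:Int) num ≤ (n:Int) := by
      obtain ⟨c, hc⟩ := hjdvd
      have hc0 : 0 ≤ c := by
        rcases (show 0 ≤ c ∨ c < 0 by omega) with h | h
        · exact h
        · nlinarith
      nlinarith
    rw [PySem.List.pyGetD_map_pyRange_of_nonneg _ _ _ _ hj0 hjlt,
        show PySem.Int.mod (n:Int) num = (((PySem.Int.mod (n:Int) num).toNat : Nat) : Int) from
          (Int.toNat_of_nonneg hj0).symm,
        PySem.List.pySetD_natCast]
    apply List.ext_getElem
    · simp
    · intro k hk1 hk2
      have hklen : k < (num - 0).toNat := by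
        simpa [PySem.List.length_pyRange_one] using hk2
      rw [List.getElem_set, List.getElem_map, List.getElem_map,
          PySem.List.getElem_pyRange_one]
      have hkint : (0:Int) + (k:Int) < num := by omega
      by_cases hkj : (PySem.Int.mod (n:Int) num).toNat = k
      · rw [if_pos hkj]
        have hkeq : (0:Int) + (k:Int) = PySem.Int.mod (n:Int) num := by omega
        rw [show ((PySem.Int.mod (n:Int) num).toNat : Int) = (0:Int) + (k:Int) by omega,
            pyRange_succ_right_step _ _ _ hnum, if_pos (by rw [hkeq]; exact ⟨hjdvd, hjle⟩)]
      · rw [if_neg hkj]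
        rw [pyRange_succ_right_step _ _ _ hnum]
        have hcond : ¬ (num ∣ (n:Int) - ((0:Int) + (k:Int)) ∧ (0:Int) + (k:Int) ≤ (n:Int)) := by
          rintro ⟨⟨c, hc⟩, -⟩
          obtain ⟨cj, hcj⟩ := hjdvd
          have hkjne : (0:Int) + (k:Int) ≠ PySem.Int.mod (n:Int) num := by omega
          have : PySem.Int.mod (n:Int) num - ((0:Int) + (k:Int)) = num * (c - cj) := by ring_nf; nlinarith
          rcases lt_trichotomy (c - cj) 0 with h | h | h
          · nlinarith
          · apply hkjne; nlinarith
          · nlinarith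
        rw [if_neg hcond, List.append_nil]

-- ===== VERDICT (by name: the statement is the Claim_ definition above) =====
theorem generate_pipeline_parallel_groups_spec : Claim_equal_generate_pipeline_parallel_groups := by
  intro ws p _ hpre
  obtain ⟨hmod, hp0, hpos⟩ := hpre
  unfold Spec_generate_pipeline_parallel_groups generate_pipeline_parallel_groups
    generate_pipeline_parallel_groups_alt
  simp only []
  rw [PySem.List.foldl_append_singleton_eq_map, List.nil_append]
  rcases (show ws ≤ 0 ∨ 0 < ws by omega) with hws | hws
  · rw [PySem.List.pyRange_one_eq_nil hws, List.foldl_nil]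
    apply List.map_congr_left
    intro i hi
    obtain ⟨hi0, hilt⟩ := PySem.List.mem_pyRange_one.1 hi
    exact pyRange_pos_empty _ _ _ (by omega) (by omega)
  · have hppos : 0 < p := hpos hws
    have hdvd : p ∣ ws := (PySem.Int.mod_eq_zero_iff_dvd _ _).1 hmod
    have hnum : 0 < PySem.Int.floordiv ws p := by
      obtain ⟨c, hc⟩ := hdvd
      have : PySem.Int.floordiv ws p = c := by
        rw [PySem.Int.floordiv_eq_ediv_of_pos hppos, hc, Int.mul_ediv_cancel_left _ (by omega)]
      rw [this]
      nlinarith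
    have hws' : ((ws.toNat : Nat) : Int) = ws := Int.toNat_of_nonneg (by omega)
    have hsc := (scatter_eq _ hnum ws.toNat).symm
    rw [hws'] at hsc
    exact hsc
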